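-- pv_equiv track=rewrite | github.com/ScoreUnder/snippets | shq.py | shellquote_optimal
-- ===== SOURCE A (Python) =====
-- shell_special_chars = set('[]{}()!*?|&;= \t\n\'"\\#`$<>~^')
--
-- shell_keywords = set(("do", "done", "while", "for", "if", "elif", "else",
--                       "then", "fi", "until", "select", "case", "esac",
--                       "function", "time", "", "coproc", "in"))
--
-- def shellquote_optimal(s):
--     if not s:
--         return "''"
--     if s in shell_keywords:
--         return "\\" + s
--     quoting = False
--     out = ""
--     for ind, char in enumerate(s):
--         if char == "'":
--             if quoting:
--                 quoting = False
--                 out += "'"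
--             out += "\\"
--         elif char in shell_special_chars:
--             if not quoting:
--                 if char == '\n':
--                     found_special = True
--                 else:
--                     found_special = False
--                     for c2 in s[ind+1:]:
--                         if c2 == "'":
--                             break
--                         elif c2 in shell_special_chars:
--                             found_special = True
--                             break
--                 if found_special:
--                     quoting = True
--                     out += "'"
--                 else:
--                     out += "\\"
--         out += char
--     if quoting:
--         out += "'"
--     return out
-- ===== SOURCE B (Python) =====
-- shell_special_chars = set('[]{}()!*?|&;= \t\n\'"\\#`$<>~^')
--
-- shell_keywords = set(("do", "done", "while", "for", "if", "elif", "else",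
--                       "then", "fi", "until", "select", "case", "esac",
--                       "function", "time", "", "coproc", "in"))
--
-- def shellquote_optimal(s):
--     if not s:
--         return "''"
--     if s in shell_keywords:
--         return "\\" + s
--     n = len(s)
--     # nxt[i]: scanning s[i:], is the first quote-or-special char a special (not a quote)?
--     nxt = [False] * (n + 1)
--     for i in range(n - 1, -1, -1):
--         c = s[i]
--         if c == "'":
--             nxt[i] = False
--         elif c in shell_special_chars:
--             nxt[i] = True
--         else:
--             nxt[i] = nxt[i + 1]
--     out = []
--     quoting = False
--     for i, char in enumerate(s):
--         if char == "'":
--             if quoting: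
--                 quoting = False
--                 out.append("'")
--             out.append("\\")
--         elif char in shell_special_chars:
--             if not quoting:
--                 if char == '\n' or nxt[i + 1]:
--                     quoting = True
--                     out.append("'")
--                 else:
--                     out.append("\\")
--         out.append(char)
--     if quoting:
--         out.append("'")
--     return ''.join(out)
-- ===== Notes on version B (the rewrite author's own statement) =====
-- stated objective: alternative
-- what changed: A rescans the rest of the string from each unquoted special character to decide quote-vs-backslash (worst-case quadratic); B instead precomputes that lookahead for every suffix in one backward pass (nxt array) and then emits the output in a single forward pass, trading A's on-demand rescans for an extra O(n) table.
import Mathlib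
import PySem

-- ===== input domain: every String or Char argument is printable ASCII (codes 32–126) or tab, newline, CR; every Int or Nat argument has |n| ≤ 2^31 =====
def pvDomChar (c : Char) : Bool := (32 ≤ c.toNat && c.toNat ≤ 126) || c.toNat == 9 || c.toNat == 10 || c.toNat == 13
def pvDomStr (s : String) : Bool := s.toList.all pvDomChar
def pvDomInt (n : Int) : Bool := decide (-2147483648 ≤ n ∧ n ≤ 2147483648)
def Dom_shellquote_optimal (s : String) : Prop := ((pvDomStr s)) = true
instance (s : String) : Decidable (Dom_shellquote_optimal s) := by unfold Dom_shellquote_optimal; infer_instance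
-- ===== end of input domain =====

-- B replaces A's on-demand inner lookahead rescans by a single backward pass precomputing,
-- for every suffix, whether its first quote-or-special character is a special, then one forward pass; objective: alternative.

-- ===== PORT A =====
-- module-level constants shared by both Pythons
def specialChars : List Char := "[]{}()!*?|&;= \t\n'\"\\#`$<>~^".toList
def shellKeywords : List String :=
  ["do", "done", "while", "for", "if", "elif", "else", "then", "fi", "until",
   "select", "case", "esac", "function", "time", "", "coproc", "in"]

-- A's inner loop: for c2 in s[ind+1:]: break on quote, found_special on special
def scanSpec : List Char → Bool
  | [] => false
  | c :: rest => if c = '\'' then false else if c ∈ specialChars then true else scanSpec rest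

-- one iteration of A's for-loop body (state = (quoting, out))
def stepA (l : List Char) (acc : Bool × List Char) (p : Int × Char) : Bool × List Char :=
  let quoting := acc.1
  let out := acc.2
  let char := p.2
  if char = '\'' then
    let qo := if quoting then (false, out ++ ['\'']) else (quoting, out)
    (qo.1, qo.2 ++ ['\\', char])
  else if char ∈ specialChars then
    if quoting = false then
      -- s[ind+1:] ported as PySem.List.slice (exact: ind+1 ≥ 0)
      let fs := if char = '\n' then true else scanSpec (PySem.List.slice l (some (p.1 + 1)) none)
      if fs then (true, out ++ ['\'', char]) else (quoting, out ++ ['\\', char])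
    else (quoting, out ++ [char])
  else (quoting, out ++ [char])

def shellquote_optimal (s : String) : String :=
  if s.toList = [] then "''"
  else if s ∈ shellKeywords then String.mk ('\\' :: s.toList)
  else
    let l := s.toList
    let st := (PySem.List.enumerate l).foldl (stepA l) (false, [])
    String.mk (if st.1 then st.2 ++ ['\''] else st.2)

-- ===== PORT B =====
-- backward pass: nxt value for every suffix (nxt list for c::rest = value :: nxt list for rest)
def buildNxt : List Char → List Bool
  | [] => [false]
  | c :: rest =>
    let r := buildNxt rest
    (if c = '\'' then false else if c ∈ specialChars then true else r.headD false) :: r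

-- forward pass over characters paired with their precomputed nxt[i+1]
def loopB : List (Char × Bool) → Bool → List Char
  | [], q => if q then ['\''] else []
  | (c, nx) :: rest, q =>
    if c = '\'' then (if q then ['\'', '\\', c] else ['\\', c]) ++ loopB rest false
    else if c ∈ specialChars then
      if q = false then
        if c = '\n' ∨ nx = true then '\'' :: c :: loopB rest true
        else '\\' :: c :: loopB rest false
      else c :: loopB rest q
    else c :: loopB rest q

def shellquote_optimal_alt (s : String) : String :=
  if s.toList = [] then "''"
  else if s ∈ shellKeywords then String.mk ('\\' :: s.toList)
  else
    let l := s.toList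
    String.mk (loopB (l.zip ((buildNxt l).tail)) false)

-- ===== PRECONDITION & SPEC =====
def Spec_shellquote_optimal (s : String) (out : String) : Prop := out = shellquote_optimal_alt s
instance (s : String) (out : String) : Decidable (Spec_shellquote_optimal s out) := by unfold Spec_shellquote_optimal; infer_instance

-- ===== CLAIM (what is proved, stated in full; the proofs are below) =====
def Claim_equal_shellquote_optimal : Prop := ∀ (s : String), Dom_shellquote_optimal s → Spec_shellquote_optimal s (shellquote_optimal s)

-- ===== LEMMAS AND PROOFS =====

lemma buildNxt_headD (l : List Char) : (buildNxt l).headD false = scanSpec l := by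
  induction l with
  | nil => simp [buildNxt, scanSpec]
  | cons c rest ih =>
    simp only [buildNxt, scanSpec, List.headD_cons, ih]

lemma buildNxt_eq (l : List Char) : buildNxt l = scanSpec l :: (buildNxt l).tail := by
  cases l with
  | nil => simp [buildNxt, scanSpec]
  | cons c rest =>
    simp only [buildNxt, scanSpec, List.tail_cons, buildNxt_headD]

lemma mainA (rest : List Char) : ∀ (l : List Char) (i : ℕ) (q : Bool) (out : List Char),
    l.drop i = rest →
    (let st := (PySem.List.enumerate rest (i : Int)).foldl (stepA l) (q, out)
     if st.1 then st.2 ++ ['\''] else st.2)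
    = out ++ loopB (rest.zip ((buildNxt rest).tail)) q := by
  induction rest with
  | nil =>
    intro l i q out _
    cases q <;> simp [PySem.List.enumerate, loopB]
  | cons c rest' ih =>
    intro l i q out h
    have h2 : l.drop (i + 1) = rest' := by
      have := congrArg List.tail h
      simpa using this
    have hslice : PySem.List.slice l (some ((i : Int) + 1)) none = rest' := by
      have hcast : ((i : Int) + 1) = ((i + 1 : ℕ) : Int) := by push_cast; ring
      rw [hcast, PySem.List.slice_from_natCast, h2]
    have hnx : (buildNxt (c :: rest')).tail = buildNxt rest' := by simp [buildNxt]
    rw [PySem.List.enumerate_cons, hnx, buildNxt_eq rest', List.zip_cons_cons]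
    simp only [List.foldl_cons]
    by_cases hc : c = '\''
    · subst hc
      have H := ih l (i + 1) false (out ++ (if q then ['\''] else []) ++ ['\\', '\'']) h2
      simp only [Nat.cast_add, Nat.cast_one] at H
      cases q <;>
        simpa [stepA, loopB, List.append_assoc] using H
    · by_cases hs : c ∈ specialChars
      · cases q with
        | false =>
          by_cases hf : (c = '\n' ∨ scanSpec rest' = true)
          · have H := ih l (i + 1) true (out ++ ['\'', c]) h2
            simp only [Nat.cast_add, Nat.cast_one] at H
            rcases hf with hn | hb
            · subst hn
              simpa [stepA, loopB, hc, hs, List.append_assoc] using H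
            · by_cases hn : c = '\n'
              · subst hn; simpa [stepA, loopB, hc, hs, List.append_assoc] using H
              · simpa [stepA, loopB, hc, hs, hn, hslice, hb, List.append_assoc] using H
          · have hn : ¬ c = '\n' := fun hh => hf (Or.inl hh)
            have hb : scanSpec rest' = false := by
              cases hx : scanSpec rest' with
              | false => rfl
              | true => exact absurd (Or.inr hx) hf
            have H := ih l (i + 1) false (out ++ ['\\', c]) h2
            simp only [Nat.cast_add, Nat.cast_one] at H
            simpa [stepA, loopB, hc, hs, hn, hslice, hb, List.append_assoc] using H
        | true =>
          have H := ih l (i + 1) true (out ++ [c]) h2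
          simp only [Nat.cast_add, Nat.cast_one] at H
          simpa [stepA, loopB, hc, hs, List.append_assoc] using H
      · have H := ih l (i + 1) q (out ++ [c]) h2
        simp only [Nat.cast_add, Nat.cast_one] at H
        simpa [stepA, loopB, hc, hs, List.append_assoc] using H

-- ===== VERDICT (by name: the statement is the Claim_ definition above) =====
theorem shellquote_optimal_spec : Claim_equal_shellquote_optimal := by
  intro s _
  unfold Spec_shellquote_optimal shellquote_optimal shellquote_optimal_alt
  split_ifs with h1 h2
  · rfl
  · rfl
  · have H := mainA s.toList s.toList 0 false [] (by simp)
    simp only [Nat.cast_zero] at H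
    exact congrArg String.mk (by simpa using H)
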